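-- pv_equiv track=rewrite | github.com/2472545/My-Programming-in-Science-course | Lab7.py | rotate_the_array
-- ===== SOURCE A (Python) =====
-- def rotate_the_array(array_size, starting_integer): # We define the function
--     the_array = [0] * array_size # Empty array
--     for i in range(array_size): # This loop will iterate over the array size
--         the_array[i] = starting_integer + i * 3 # Seperate all elements by 3
--     for i in range(0, array_size - 2, 2): # This loop will iterate over the array size with increments of 2
--         temp = the_array[i] # Temporary variable
--         the_array[i] = the_array[i + 2] # Move even elements two positions behind
--         the_array[i + 2] = temp # The new elements are at the i'th place
--     return the_array # We return the new array
-- ===== SOURCE B (Python) =====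
-- def rotate_the_array(array_size, starting_integer):
--     # closed form: no temporary array, no swap loop
--     last_even = array_size - 1 if array_size % 2 else array_size - 2
--     return [starting_integer if i == last_even
--             else starting_integer + 3 * (i + 2) if i % 2 == 0
--             else starting_integer + 3 * i
--             for i in range(array_size)]
-- ===== Notes on version B (the rewrite author's own statement) =====
-- stated objective: simpler
-- what changed: Replaces the two loops (fill then pairwise swap chain) by a single comprehension computing each element from its index via the closed form of the even-slice rotation.
import Mathlib
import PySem

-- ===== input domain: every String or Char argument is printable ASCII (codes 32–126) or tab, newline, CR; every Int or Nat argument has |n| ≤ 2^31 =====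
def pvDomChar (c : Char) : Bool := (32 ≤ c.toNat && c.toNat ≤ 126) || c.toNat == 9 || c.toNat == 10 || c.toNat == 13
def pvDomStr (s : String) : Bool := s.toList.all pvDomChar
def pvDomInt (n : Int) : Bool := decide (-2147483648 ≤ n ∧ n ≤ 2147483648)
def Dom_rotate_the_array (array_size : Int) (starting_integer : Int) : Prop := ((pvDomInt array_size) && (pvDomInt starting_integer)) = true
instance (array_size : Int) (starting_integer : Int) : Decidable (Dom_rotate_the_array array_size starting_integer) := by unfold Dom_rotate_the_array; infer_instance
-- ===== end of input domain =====

-- B computes each element directly from its index (closed form of the even-slice rotation): same values, one pass, no fill-then-swap loops.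

-- ===== PORT A =====
-- body of A's swap iteration: temp = a[i]; a[i] = a[i+2]; a[i+2] = temp  (temp inlined)
def pvSwapA (a : List Int) (i : Int) : List Int :=
  PySem.List.pySetD (PySem.List.pySetD a i (PySem.List.pyGetD a (i + 2) 0)) (i + 2)
    (PySem.List.pyGetD a i 0)

def rotate_the_array (array_size : Int) (starting_integer : Int) : List Int :=
  (PySem.List.pyRange 0 (array_size - 2) 2).foldl pvSwapA
    ((PySem.List.pyRange 0 array_size 1).foldl
      (fun a i => PySem.List.pySetD a i (starting_integer + i * 3))
      (List.replicate array_size.toNat 0))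

-- ===== PORT B =====
def rotate_the_array_alt (array_size : Int) (starting_integer : Int) : List Int :=
  let last_even := if PySem.Int.mod array_size 2 ≠ 0 then array_size - 1 else array_size - 2
  (PySem.List.pyRange 0 array_size 1).map (fun i =>
    if i = last_even then starting_integer
    else if PySem.Int.mod i 2 = 0 then starting_integer + 3 * (i + 2)
    else starting_integer + 3 * i)

-- ===== PRECONDITION & SPEC =====
def Spec_rotate_the_array (array_size : Int) (starting_integer : Int) (out : List Int) : Prop := out = rotate_the_array_alt array_size starting_integer
instance (array_size : Int) (starting_integer : Int) (out : List Int) : Decidable (Spec_rotate_the_array array_size starting_integer out) := by unfold Spec_rotate_the_array; infer_instance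

-- ===== CLAIM (what is proved, stated in full; the proofs are below) =====
def Claim_equal_rotate_the_array : Prop := ∀ (array_size : Int) (starting_integer : Int), Dom_rotate_the_array array_size starting_integer → Spec_rotate_the_array array_size starting_integer (rotate_the_array array_size starting_integer)

-- ===== LEMMAS AND PROOFS =====

-- array contents after t swap iterations, starting from the filled array
def gArr (m t : Nat) (s : Int) : List Int :=
  (List.range m).map (fun j =>
    if j % 2 = 0 ∧ j < 2 * t then s + (j : Int) * 3 + 6
    else if j = 2 * t then s
    else s + (j : Int) * 3)

-- a fold of in-range assignments over xs ++ ys only touches xs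
theorem foldl_setD_append (f : Int → Int) (l : List Int) (xs ys : List Int)
    (h : ∀ i ∈ l, 0 ≤ i ∧ i.toNat < xs.length) :
    l.foldl (fun a i => PySem.List.pySetD a i (f i)) (xs ++ ys)
      = (l.foldl (fun a i => PySem.List.pySetD a i (f i)) xs) ++ ys := by
  induction l generalizing xs with
  | nil => rfl
  | cons i l ih =>
    obtain ⟨h0, hlt⟩ := h i (List.mem_cons_self ..)
    simp only [List.foldl_cons]
    rw [PySem.List.pySetD_of_nonneg _ _ h0, PySem.List.pySetD_of_nonneg _ _ h0,
        List.set_append, if_pos hlt]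
    rw [ih]
    intro j hj
    have := h j (List.mem_cons_of_mem _ hj)
    simpa using this

-- the fill loop produces the arithmetic array
theorem fill_loop (s : Int) (m : Nat) :
    ((List.range m).map (fun k : Nat => (k : Int))).foldl
        (fun a i => PySem.List.pySetD a i (s + i * 3)) (List.replicate m (0 : Int))
      = (List.range m).map (fun k : Nat => s + (k : Int) * 3) := by
  induction m with
  | zero => rfl
  | succ m ih =>
    rw [List.range_succ, List.map_append, List.map_append, List.foldl_append]
    have hrep : List.replicate (m + 1) (0 : Int) = List.replicate m 0 ++ [0] := by
      simp [List.replicate_succ']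
    rw [hrep, foldl_setD_append]
    · rw [ih]
      simp only [List.map_cons, List.map_nil, List.foldl_cons, List.foldl_nil]
      rw [PySem.List.pySetD_of_nonneg _ _ (by positivity), Int.toNat_natCast,
          List.set_append, if_neg (by simp)]
      simp
    · intro i hi
      simp only [List.mem_map, List.mem_range] at hi
      obtain ⟨k, hk, rfl⟩ := hi
      simp [hk]

-- one swap iteration advances gArr
theorem swap_step (m t : Nat) (s : Int) (h : 2 * t + 2 < m) :
    pvSwapA (gArr m t s) ((2 * t : Nat) : Int) = gArr m (t + 1) s := by
  have h2 : ((2 * t : Nat) : Int) + 2 = ((2 * t + 2 : Nat) : Int) := by push_cast; ring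
  have hget : ∀ j : Nat, j < m → PySem.List.pyGetD (gArr m t s) ((j : Nat) : Int) 0 =
      (if j % 2 = 0 ∧ j < 2 * t then s + (j : Int) * 3 + 6
       else if j = 2 * t then s else s + (j : Int) * 3) := by
    intro j hj
    rw [PySem.List.pyGetD_of_nonneg _ _ (by positivity), Int.toNat_natCast, gArr,
        PySem.List.getD_map_range _ _ _ _ hj]
  unfold pvSwapA
  rw [h2, hget _ (by omega), hget _ (by omega),
      PySem.List.pySetD_of_nonneg _ _ (by positivity),
      PySem.List.pySetD_of_nonneg _ _ (by positivity),
      Int.toNat_natCast, Int.toNat_natCast]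
  apply List.ext_getElem
  · simp [gArr]
  · intro j hj1 hj2
    have hj : j < m := by simpa [gArr] using hj2
    rw [List.getElem_set, List.getElem_set]
    simp only [gArr, List.getElem_map, List.getElem_range]
    split_ifs <;> first | rfl | omega

-- the whole swap loop, iterated
theorem swap_loop (m : Nat) (s : Int) : ∀ (k : Nat), 2 * k + 1 ≤ m →
    ((List.range k).map (fun t : Nat => ((2 * t : Nat) : Int))).foldl pvSwapA (gArr m 0 s)
      = gArr m k s := by
  intro k
  induction k with
  | zero => intro _; rfl
  | succ k ih =>
    intro hk
    rw [List.range_succ, List.map_append, List.foldl_append, ih (by omega)]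
    simpa using swap_step m k s (by omega)

-- main equivalence
theorem rotate_eq (n s : Int) : rotate_the_array n s = rotate_the_array_alt n s := by
  rcases le_or_gt n 0 with hn | hn
  · have h1 : PySem.List.pyRange 0 n 1 = [] := PySem.List.pyRange_one_eq_nil (by omega)
    have h2 : PySem.List.pyRange 0 (n - 2) 2 = [] := by
      rw [PySem.List.pyRange_of_pos _ _ (by norm_num), if_neg (by omega)]; rfl
    simp [rotate_the_array, rotate_the_array_alt, h1, h2]
    omega
  · obtain ⟨m, rfl⟩ : ∃ m : Nat, n = (m : Int) := ⟨n.toNat, by omega⟩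
    have hm : 1 ≤ m := by exact_mod_cast hn
    set k : Nat := (m - 1) / 2 with hk
    have hrange1 : PySem.List.pyRange 0 (m : Int) 1
        = (List.range m).map (fun j : Nat => (j : Int)) := by
      rw [PySem.List.pyRange_one]; simp
    have hfill : (PySem.List.pyRange 0 (m : Int) 1).foldl
        (fun a i => PySem.List.pySetD a i (s + i * 3)) (List.replicate ((m : Int)).toNat 0)
        = gArr m 0 s := by
      rw [hrange1, Int.toNat_natCast, fill_loop]
      simp only [gArr]
      apply List.map_congr_left
      intro j hj
      rw [if_neg (by omega)]
      by_cases h0 : j = 0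
      · subst h0; rw [if_pos (by omega)]; push_cast; ring
      · rw [if_neg (by omega)]
    have hrange2 : PySem.List.pyRange 0 ((m : Int) - 2) 2
        = (List.range k).map (fun t : Nat => ((2 * t : Nat) : Int)) := by
      rw [PySem.List.pyRange_of_pos _ _ (by norm_num)]
      by_cases hm2 : 2 < m
      · rw [if_pos (by omega)]
        have hcnt : (((m : Int) - 2 - 0 + 2 - 1) / 2).toNat = k := by omega
        rw [hcnt]
        apply List.map_congr_left
        intro t _
        push_cast; ring
      · rw [if_neg (by omega)]
        have hk0 : k = 0 := by omega
        simp [hk0]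
    rw [rotate_the_array, hfill, hrange2, swap_loop m s k (by omega)]
    simp only [rotate_the_array_alt, hrange1, List.map_map, gArr]
    apply List.map_congr_left
    intro j hj
    simp only [List.mem_range] at hj
    simp only [Function.comp_apply]
    have hmods : PySem.Int.mod ((m : Nat) : Int) 2 = ((m % 2 : Nat) : Int) := by
      exact_mod_cast PySem.Int.mod_natCast m 2
    have hmodj : PySem.Int.mod ((j : Nat) : Int) 2 = ((j % 2 : Nat) : Int) := by
      exact_mod_cast PySem.Int.mod_natCast j 2
    rw [hmods, hmodj]
    have hle : (if ((m % 2 : Nat) : Int) ≠ 0 then (m : Int) - 1 else (m : Int) - 2)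
        = ((2 * k : Nat) : Int) := by
      by_cases hp : m % 2 = 1
      · rw [if_pos (by omega)]; omega
      · rw [if_neg (by omega)]; omega
    rw [hle]
    by_cases hje : j = 2 * k
    · rw [if_neg (by omega), if_pos (by omega), if_pos (by exact_mod_cast hje)]
    · rw [if_neg (show ¬ ((j : Nat) : Int) = ((2 * k : Nat) : Int) from by exact_mod_cast hje)]
      by_cases he : j % 2 = 0
      · have hlt : j < 2 * k := by omega
        rw [if_pos ⟨he, hlt⟩, if_pos (show ((j % 2 : Nat) : Int) = 0 from by exact_mod_cast he)]
        ring
      · rw [if_neg (by omega), if_neg (by omega),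
            if_neg (show ¬ ((j % 2 : Nat) : Int) = 0 from by exact_mod_cast he)]
        ring

-- ===== VERDICT (by name: the statement is the Claim_ definition above) =====
theorem rotate_the_array_spec : Claim_equal_rotate_the_array := by
  intro n s _
  unfold Spec_rotate_the_array
  exact rotate_eq n s
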